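-- pv_equiv track=rewrite | github.com/burning-calamity/extirpation | src/extirpation/bundled_online/jefferson_disk.py | jefferson_disk_encrypt
-- ===== SOURCE A (Python) =====
-- ALPHABET = 'ABCDEFGHIJKLMNOPQRSTUVWXYZ'
--
-- def _sanitize_wheels(wheels: tuple[int, ...] | list[int] | None) -> list[int]:
--     if not wheels:
--         return [3, 1, 4, 1, 5]
--     vals = [int(x) % 26 for x in wheels]
--     return vals or [0]
--
-- def _shift(ch: str, amount: int) -> str:
--     if ch.upper() not in ALPHABET:
--         return ch
--     idx = ALPHABET.index(ch.upper())
--     out = ALPHABET[(idx + amount) % 26]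
--     return out if ch.isupper() else out.lower()
--
-- def jefferson_disk_encrypt(plaintext: str, wheels: tuple[int, ...] | list[int] | None = None) -> str:
--     """Encrypt text using repeating wheel shifts."""
--     wheel = _sanitize_wheels(wheels)
--     out: list[str] = []
--     i = 0
--     for ch in plaintext:
--         if ch.upper() in ALPHABET:
--             out.append(_shift(ch, wheel[i % len(wheel)]))
--             i += 1
--         else:
--             out.append(ch)
--     return ''.join(out)
-- ===== SOURCE B (Python) =====
-- ALPHABET = 'ABCDEFGHIJKLMNOPQRSTUVWXYZ'
--
-- def _shift(ch: str, amount: int) -> str: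
--     if ch.upper() not in ALPHABET:
--         return ch
--     idx = ALPHABET.index(ch.upper())
--     out = ALPHABET[(idx + amount) % 26]
--     return out if ch.isupper() else out.lower()
--
-- def jefferson_disk_encrypt(plaintext: str, wheels=None) -> str:
--     """Encrypt text using repeating wheel shifts (two-pass: encrypt letters, then merge)."""
--     wheel = [int(x) % 26 for x in wheels] if wheels else [3, 1, 4, 1, 5]
--     letters = [ch for ch in plaintext if ch.upper() in ALPHABET]
--     enc = [_shift(ch, wheel[k % len(wheel)]) for k, ch in enumerate(letters)]
--     it = iter(enc)
--     return ''.join(next(it) if ch.upper() in ALPHABET else ch for ch in plaintext)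
-- ===== Notes on version B (the rewrite author's own statement) =====
-- stated objective: alternative
-- what changed: Replaces A's single stateful loop carrying a letter counter with a two-pass decomposition: collect the letters, encrypt them by position against the wheel, then merge the ciphertext letters back into the original text.
import Mathlib
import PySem

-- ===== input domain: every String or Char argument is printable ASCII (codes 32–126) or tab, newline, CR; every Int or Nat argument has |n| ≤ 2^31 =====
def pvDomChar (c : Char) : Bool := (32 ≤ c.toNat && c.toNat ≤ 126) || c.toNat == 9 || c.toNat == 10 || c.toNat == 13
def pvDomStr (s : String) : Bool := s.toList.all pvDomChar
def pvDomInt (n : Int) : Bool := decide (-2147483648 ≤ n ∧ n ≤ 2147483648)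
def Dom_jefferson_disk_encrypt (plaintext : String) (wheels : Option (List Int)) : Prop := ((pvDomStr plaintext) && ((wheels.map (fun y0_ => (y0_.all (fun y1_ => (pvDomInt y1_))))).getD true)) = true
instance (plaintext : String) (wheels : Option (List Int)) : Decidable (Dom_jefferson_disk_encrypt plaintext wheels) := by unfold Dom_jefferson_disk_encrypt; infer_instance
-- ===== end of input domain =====

-- B replaces A's single stateful loop (letter counter carried through the text) by a two-pass
-- decomposition: encrypt the collected letters by position, then merge them back; same cost.

-- ===== PORT A =====
def pvAlpha : List Char := "ABCDEFGHIJKLMNOPQRSTUVWXYZ".toList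

def sanitizeWheelsA (wheels : Option (List Int)) : List Int :=
  match wheels with
  | none => [3, 1, 4, 1, 5]
  | some ws =>
    if ws.isEmpty then [3, 1, 4, 1, 5]
    else
      let vals := ws.map (fun x => PySem.Int.mod x 26)
      if vals.isEmpty then [0] else vals

def shiftA (ch : Char) (amount : Int) : Char :=
  if ¬ (pvAlpha.contains (PySem.Chars.upperChar ch)) then ch
  else
    let idx : Int := ((PySem.List.index? pvAlpha (PySem.Chars.upperChar ch)).getD 0 : Nat)
    -- index in range 0..25, so the Python indexing cannot fail; getD default is never used
    let out := (PySem.List.pyGet? pvAlpha (PySem.Int.mod (idx + amount) 26)).getD ch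
    if PySem.Chars.isupper ch then out else PySem.Chars.lowerChar out

def loopA (wheel : List Int) : List Char → Nat → List Char → List Char
  | [], _, out => out
  | ch :: rest, i, out =>
    if pvAlpha.contains (PySem.Chars.upperChar ch) then
      loopA wheel rest (i + 1)
        (out ++ [shiftA ch ((PySem.List.pyGet? wheel (PySem.Int.mod (i : Int) wheel.length)).getD 0)])
    else
      loopA wheel rest i (out ++ [ch])

def jefferson_disk_encrypt (plaintext : String) (wheels : Option (List Int)) : String :=
  let wheel := sanitizeWheelsA wheels
  String.ofList (loopA wheel plaintext.toList 0 [])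

-- ===== PORT B =====
def shiftB (ch : Char) (amount : Int) : Char :=
  if ¬ (pvAlpha.contains (PySem.Chars.upperChar ch)) then ch
  else
    let idx : Int := ((PySem.List.index? pvAlpha (PySem.Chars.upperChar ch)).getD 0 : Nat)
    let out := (PySem.List.pyGet? pvAlpha (PySem.Int.mod (idx + amount) 26)).getD ch
    if PySem.Chars.isupper ch then out else PySem.Chars.lowerChar out

def wheelB (wheels : Option (List Int)) : List Int :=
  match wheels with
  | none => [3, 1, 4, 1, 5]
  | some ws => if ws.isEmpty then [3, 1, 4, 1, 5] else ws.map (fun x => PySem.Int.mod x 26)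

-- merge: walk the plaintext, drawing the next ciphertext letter for each letter position
def mergeB : List Char → List Char → List Char
  | [], _ => []
  | c :: rest, cs =>
    if pvAlpha.contains (PySem.Chars.upperChar c) then
      match cs with
      | e :: cs' => e :: mergeB rest cs'
      | [] => []          -- exhausted iterator ends the generator expression (never reached)
    else c :: mergeB rest cs

def jefferson_disk_encrypt_alt (plaintext : String) (wheels : Option (List Int)) : String :=
  let wheel := wheelB wheels
  let letters := plaintext.toList.filter (fun c => pvAlpha.contains (PySem.Chars.upperChar c))
  let enc := (PySem.List.enumerate letters).map
    (fun p => shiftB p.2 ((PySem.List.pyGet? wheel (PySem.Int.mod p.1 wheel.length)).getD 0))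
  String.ofList (mergeB plaintext.toList enc)

-- ===== PRECONDITION & SPEC =====
def Spec_jefferson_disk_encrypt (plaintext : String) (wheels : Option (List Int)) (out : String) : Prop := out = jefferson_disk_encrypt_alt plaintext wheels
instance (plaintext : String) (wheels : Option (List Int)) (out : String) : Decidable (Spec_jefferson_disk_encrypt plaintext wheels out) := by unfold Spec_jefferson_disk_encrypt; infer_instance

-- ===== CLAIM (what is proved, stated in full; the proofs are below) =====
def Claim_equal_jefferson_disk_encrypt : Prop := ∀ (plaintext : String) (wheels : Option (List Int)), Dom_jefferson_disk_encrypt plaintext wheels → Spec_jefferson_disk_encrypt plaintext wheels (jefferson_disk_encrypt plaintext wheels)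

-- ===== LEMMAS AND PROOFS =====
theorem shiftA_eq_shiftB (ch : Char) (amount : Int) : shiftA ch amount = shiftB ch amount := rfl

theorem sanitize_eq (wheels : Option (List Int)) : sanitizeWheelsA wheels = wheelB wheels := by
  cases wheels with
  | none => rfl
  | some ws =>
    cases ws with
    | nil => rfl
    | cons x xs => simp [sanitizeWheelsA, wheelB]

-- B's per-letter ciphertext, indexed from an arbitrary starting counter i
def encFrom (wheel : List Int) (i : Nat) : List Char → List Char
  | [] => []
  | c :: cs =>
    shiftB c ((PySem.List.pyGet? wheel (PySem.Int.mod (i : Int) wheel.length)).getD 0)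
      :: encFrom wheel (i + 1) cs

theorem enumerate_map_eq_encFrom (wheel : List Int) (letters : List Char) (i : Nat) :
    (PySem.List.enumerate letters (i : Int)).map
        (fun p => shiftB p.2 ((PySem.List.pyGet? wheel (PySem.Int.mod p.1 wheel.length)).getD 0))
      = encFrom wheel i letters := by
  induction letters generalizing i with
  | nil => rfl
  | cons c cs ih =>
    have h1 : ((i : Int) + 1) = ((i + 1 : Nat) : Int) := by push_cast; ring
    simp only [PySem.List.enumerate_cons, List.map_cons, encFrom]
    rw [h1, ih]

theorem loopA_eq (wheel : List Int) (l : List Char) :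
    ∀ (i : Nat) (acc : List Char),
      loopA wheel l i acc
        = acc ++ mergeB l (encFrom wheel i
            (l.filter (fun c => pvAlpha.contains (PySem.Chars.upperChar c)))) := by
  induction l with
  | nil => intro i acc; simp [loopA, mergeB]
  | cons c rest ih =>
    intro i acc
    by_cases h : PySem.Chars.upperChar c ∈ pvAlpha
    · simp [loopA, h, mergeB, encFrom, ih, shiftA_eq_shiftB]
    · simp [loopA, h, mergeB, ih]

-- ===== VERDICT (by name: the statement is the Claim_ definition above) =====
theorem jefferson_disk_encrypt_spec : Claim_equal_jefferson_disk_encrypt := by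
  intro plaintext wheels _
  unfold Spec_jefferson_disk_encrypt
  simp only [jefferson_disk_encrypt, jefferson_disk_encrypt_alt, sanitize_eq, loopA_eq,
    List.nil_append]
  have hl := enumerate_map_eq_encFrom (wheelB wheels)
    (List.filter (fun c => pvAlpha.contains (PySem.Chars.upperChar c)) plaintext.toList) 0
  simp only [Nat.cast_zero] at hl
  rw [hl]
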